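-- pv_equiv track=rewrite | github.com/Dyr-El/the_song_of_ducks_and_dragons | quest_6_1.py | sword_mentors
-- ===== SOURCE A (Python) =====
-- def sword_mentors(data):
--     total = 0
--     mentors = 0
--     for c in data:
--         if c == 'a':
--             total += mentors
--         elif c == 'A':
--             mentors += 1
--     return total
-- ===== SOURCE B (Python) =====
-- def sword_mentors(data):
--     parts = data.split('a')
--     n = len(parts)
--     return sum(part.count('A') * (n - 1 - i) for i, part in enumerate(parts))
-- ===== Notes on version B (the rewrite author's own statement) =====
-- stated objective: alternative
-- what changed: Replaces A's per-character accumulator loop by a split/count decomposition: split the string on 'a' and return the weighted sum of per-piece 'A' counts, each 'A' in piece i preceding exactly n-1-i of the 'a' separators.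
import Mathlib
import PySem

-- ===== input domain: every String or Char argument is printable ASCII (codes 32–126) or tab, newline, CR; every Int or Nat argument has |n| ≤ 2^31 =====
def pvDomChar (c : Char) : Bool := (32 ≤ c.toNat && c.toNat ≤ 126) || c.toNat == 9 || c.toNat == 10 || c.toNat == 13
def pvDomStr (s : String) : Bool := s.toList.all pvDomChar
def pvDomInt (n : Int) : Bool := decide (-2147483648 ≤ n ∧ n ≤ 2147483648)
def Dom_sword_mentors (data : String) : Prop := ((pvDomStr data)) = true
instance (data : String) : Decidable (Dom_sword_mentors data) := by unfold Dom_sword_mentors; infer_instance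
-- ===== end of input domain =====

-- B replaces A's per-character accumulator loop by a split/count decomposition:
-- split the string on 'a'; each 'A' in piece i precedes exactly (n-1-i) of the 'a'
-- separators, so the answer is a weighted sum of per-piece 'A' counts (objective: alternative).

-- ===== PORT A =====
def sword_mentors (data : String) : Int :=
  let r := data.toList.foldl
    (fun (s : Int × Int) c =>
      if c = 'a' then (s.1 + s.2, s.2)
      else if c = 'A' then (s.1, s.2 + 1)
      else s) (0, 0)
  r.1

-- ===== PORT B =====
def sword_mentors_alt (data : String) : Int :=
  let parts := PySem.Chars.splitOn data.toList ['a']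
  let n : Int := parts.length
  ((PySem.List.enumerate parts).map
    (fun p => (PySem.Chars.count p.2 ['A'] : Int) * (n - 1 - p.1))).sum

-- ===== PRECONDITION & SPEC =====
def Spec_sword_mentors (data : String) (out : Int) : Prop := out = sword_mentors_alt data
instance (data : String) (out : Int) : Decidable (Spec_sword_mentors data out) := by unfold Spec_sword_mentors; infer_instance

-- ===== CLAIM (what is proved, stated in full; the proofs are below) =====
def Claim_equal_sword_mentors : Prop := ∀ (data : String), Dom_sword_mentors data → Spec_sword_mentors data (sword_mentors data)

-- ===== LEMMAS AND PROOFS =====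

/-- number of 'a' characters, as an Int -/
def pvCa : List Char → Int
  | [] => 0
  | c :: l => (if c = 'a' then 1 else 0) + pvCa l

/-- A's inversion count: for each 'A', the number of 'a's after it -/
def pvS : List Char → Int
  | [] => 0
  | c :: l => (if c = 'A' then pvCa l else 0) + pvS l

/-- number of 'A' characters, as an Int -/
def pvCA : List Char → Int
  | [] => 0
  | c :: l => (if c = 'A' then 1 else 0) + pvCA l

/-- reference split on 'a' with a reversed current-piece accumulator -/
def pvSplit : List Char → List Char → List (List Char)
  | [], cur => [cur.reverse]
  | c :: rest, cur =>
      if c = 'a' then cur.reverse :: pvSplit rest []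
      else pvSplit rest (c :: cur)

/-- B's weighted sum, with the weight written as "pieces remaining after this one" -/
def pvW : List (List Char) → Int
  | [] => 0
  | p :: ps => (p.count 'A' : Int) * ps.length + pvW ps

lemma foldA (l : List Char) (t m : Int) :
    l.foldl (fun (s : Int × Int) c =>
      if c = 'a' then (s.1 + s.2, s.2)
      else if c = 'A' then (s.1, s.2 + 1)
      else s) (t, m) = (t + pvS l + m * pvCa l, m + pvCA l) := by
  induction l generalizing t m with
  | nil => simp [pvS, pvCa, pvCA]
  | cons c l ih =>
    simp only [List.foldl_cons]
    by_cases ha : c = 'a'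
    · simp [ha, ih, pvS, pvCa, pvCA]; ring
    · by_cases hA : c = 'A'
      · simp [hA, ih, pvS, pvCa, pvCA]; ring_nf; simp
      · simp [ha, hA, ih, pvS, pvCa, pvCA]

lemma count_go_singleton (l : List Char) (fuel acc : Nat) (h : l.length ≤ fuel) :
    PySem.Chars.count.go ['A'] fuel l acc = acc + l.count 'A' := by
  induction l generalizing fuel acc with
  | nil => cases fuel <;> simp [PySem.Chars.count.go]
  | cons c l ih =>
    cases fuel with
    | zero => simp at h
    | succ f =>
      simp only [List.length_cons, Nat.succ_le_succ_iff] at h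
      by_cases hc : c = 'A'
      · simp [PySem.Chars.count.go, List.isPrefixOf, hc, ih _ _ h]
        omega
      · simp [PySem.Chars.count.go, List.isPrefixOf, hc, Ne.symm hc, ih _ _ h]

lemma count_singleton (l : List Char) : (PySem.Chars.count l ['A'] : Int) = (l.count 'A' : Int) := by
  have : PySem.Chars.count l ['A'] = l.count 'A' := by
    simp [PySem.Chars.count, count_go_singleton l l.length 0 le_rfl]
  rw [this]

lemma splitOn_go_eq (l : List Char) (cur : List Char) (acc : List (List Char)) (fuel : Nat)
    (h : l.length ≤ fuel) :
    PySem.Chars.splitOn.go ['a'] fuel l cur acc = acc.reverse ++ pvSplit l cur := by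
  induction l generalizing cur acc fuel with
  | nil => cases fuel <;> simp [PySem.Chars.splitOn.go, pvSplit]
  | cons c l ih =>
    cases fuel with
    | zero => simp at h
    | succ f =>
      simp only [List.length_cons, Nat.succ_le_succ_iff] at h
      by_cases hc : c = 'a'
      · simp [PySem.Chars.splitOn.go, List.isPrefixOf, hc, ih _ _ _ h, pvSplit]
      · simp [PySem.Chars.splitOn.go, List.isPrefixOf, hc, Ne.symm hc, ih _ _ _ h, pvSplit]

lemma splitOn_eq (l : List Char) :
    PySem.Chars.splitOn l ['a'] = pvSplit l [] := by
  simp [PySem.Chars.splitOn, splitOn_go_eq l [] [] (l.length + 1) (by omega)]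

lemma length_pvSplit (l cur : List Char) :
    ((pvSplit l cur).length : Int) = pvCa l + 1 := by
  induction l generalizing cur with
  | nil => simp [pvSplit, pvCa]
  | cons c l ih =>
    by_cases hc : c = 'a'
    · simp [pvSplit, hc, pvCa, ih]; ring
    · simp [pvSplit, hc, pvCa, ih]

lemma count_A_int (l : List Char) : (l.count 'A' : Int) = pvCA l := by
  induction l with
  | nil => simp [pvCA]
  | cons c l ih => by_cases hc : c = 'A' <;> simp [hc, pvCA, ih] <;> omega

lemma pvCA_reverse (l : List Char) : pvCA l.reverse = pvCA l := by
  have aux : ∀ xs ys : List Char, pvCA (xs ++ ys) = pvCA xs + pvCA ys := by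
    intro xs ys
    induction xs with
    | nil => simp [pvCA]
    | cons x xs ih => simp [pvCA, ih]; ring
  induction l with
  | nil => rfl
  | cons c l ih => simp [pvCA, List.reverse_cons, aux, ih]; ring

lemma pvW_pvSplit (l cur : List Char) :
    pvW (pvSplit l cur) = pvS l + pvCA cur * pvCa l := by
  induction l generalizing cur with
  | nil => simp [pvSplit, pvW, pvS, pvCa]
  | cons c l ih =>
    by_cases hc : c = 'a'
    · subst hc
      simp only [pvSplit, if_true]
      rw [show pvW (cur.reverse :: pvSplit l []) =
            ((cur.reverse.count 'A' : Int)) * ((pvSplit l []).length : Int) + pvW (pvSplit l [])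
          from rfl, length_pvSplit, count_A_int, pvCA_reverse, ih]
      simp [pvS, pvCa, pvCA]
      ring
    · simp only [pvSplit, if_neg hc]
      rw [ih]
      simp [pvS, pvCa, pvCA, hc]
      split_ifs <;> ring

lemma enum_sum (ps : List (List Char)) (k N : Int) (h : k + ps.length = N) :
    ((PySem.List.enumerate ps k).map
      (fun p => (PySem.Chars.count p.2 ['A'] : Int) * (N - 1 - p.1))).sum = pvW ps := by
  induction ps generalizing k with
  | nil => simp [pvW]
  | cons p ps ih =>
    simp only [List.length_cons] at h
    rw [PySem.List.enumerate_cons, List.map_cons, List.sum_cons,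
        ih (k + 1) (by push_cast at h ⊢; omega)]
    have hN : N - 1 - k = (ps.length : Int) := by push_cast at h ⊢; omega
    rw [count_singleton, hN,
        show pvW (p :: ps) = ((p.count 'A' : Int)) * (ps.length : Int) + pvW ps from rfl]

-- ===== VERDICT (by name: the statement is the Claim_ definition above) =====
theorem sword_mentors_spec : Claim_equal_sword_mentors := by
  intro data _
  unfold Spec_sword_mentors sword_mentors sword_mentors_alt
  simp only [foldA, zero_mul, add_zero, zero_add]
  rw [splitOn_eq]
  rw [enum_sum (pvSplit data.toList []) 0 ((pvSplit data.toList []).length : Int) (by ring)]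
  rw [pvW_pvSplit]
  simp [pvCA]
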